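-- pv_equiv track=rewrite | github.com/ajnirp/binarysearch | 123-number-flip.py | solve
-- ===== SOURCE A (Python) =====
-- def solve(n):
--     s = str(n)
--     res = []
--     flipped = False
--     for c in s:
--         if c != '3':
--             if flipped:
--                 res.append(c)
--             else:
--                 res.append('3')
--                 flipped = True
--         else:
--             res.append(c)
--     return int(''.join(res))
-- ===== SOURCE B (Python) =====
-- def solve(n):
--     s = str(n)
--     i = next((j for j, c in enumerate(s) if c != '3'), -1)
--     if i == -1:
--         return int(s)
--     return int(s[:i] + '3' + s[i+1:])
-- ===== Notes on version B (the rewrite author's own statement) =====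
-- stated objective: simpler
-- what changed: Replaces A's flag-driven char-by-char accumulation loop with a locate-then-splice decomposition: find the index of the first non-'3' character and rebuild the string with one slice splice.
import Mathlib
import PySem

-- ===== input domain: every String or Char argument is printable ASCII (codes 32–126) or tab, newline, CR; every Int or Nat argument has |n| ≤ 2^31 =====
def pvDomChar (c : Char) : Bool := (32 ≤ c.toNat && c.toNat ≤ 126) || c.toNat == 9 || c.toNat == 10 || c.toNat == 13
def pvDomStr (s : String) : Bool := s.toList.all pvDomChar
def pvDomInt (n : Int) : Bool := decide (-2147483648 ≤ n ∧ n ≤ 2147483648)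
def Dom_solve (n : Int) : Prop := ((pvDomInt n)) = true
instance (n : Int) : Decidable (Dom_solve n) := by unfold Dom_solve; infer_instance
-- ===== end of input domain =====

-- B replaces A's flag-driven accumulation loop by locate-the-first-non-'3'-index then splice; objective: simpler.

-- ===== PORT A =====
-- the for-loop over s with state (res, flipped); res is built front-to-back
def solveLoop (cs : List Char) (flipped : Bool) : List Char :=
  match cs with
  | [] => []
  | c :: rest =>
    if c ≠ '3' then
      if flipped then c :: solveLoop rest flipped
      else '3' :: solveLoop rest true
    else c :: solveLoop rest flipped

def solve (n : Int) : Int :=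
  let s := (PySem.Int.toStr n).toList
  let res := solveLoop s false
  -- int(''.join(res)); the joined string is always a valid int literal here
  (PySem.Int.ofStr? (String.mk res)).getD 0

-- ===== PORT B =====
-- next((j for j,c in enumerate(s) if c != '3'), -1): index of first char ≠ '3', none for the -1 sentinel
def firstNon3 (cs : List Char) : Option Nat :=
  match cs with
  | [] => none
  | c :: rest => if c ≠ '3' then some 0 else (firstNon3 rest).map (· + 1)

def solve_alt (n : Int) : Int :=
  let s := (PySem.Int.toStr n).toList
  match firstNon3 s with
  | none => (PySem.Int.ofStr? (String.mk s)).getD 0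
  | some i =>
    -- int(s[:i] + '3' + s[i+1:]) with 0 ≤ i < len s
    (PySem.Int.ofStr? (String.mk (s.take i ++ '3' :: s.drop (i + 1)))).getD 0

-- ===== PRECONDITION & SPEC =====
def Spec_solve (n : Int) (out : Int) : Prop := out = solve_alt n
instance (n : Int) (out : Int) : Decidable (Spec_solve n out) := by unfold Spec_solve; infer_instance

-- ===== CLAIM (what is proved, stated in full; the proofs are below) =====
def Claim_equal_solve : Prop := ∀ (n : Int), Dom_solve n → Spec_solve n (solve n)

-- ===== LEMMAS AND PROOFS =====
theorem solveLoop_true (cs : List Char) : solveLoop cs true = cs := by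
  induction cs with
  | nil => rfl
  | cons c rest ih => simp [solveLoop, ih]

theorem solveLoop_false (cs : List Char) :
    solveLoop cs false =
      match firstNon3 cs with
      | none => cs
      | some i => cs.take i ++ '3' :: cs.drop (i + 1) := by
  induction cs with
  | nil => rfl
  | cons c rest ih =>
    by_cases h : c = '3'
    · simp [solveLoop, firstNon3, h, ih]
      cases hf : firstNon3 rest with
      | none => simp
      | some i => simp
    · simp [solveLoop, firstNon3, h, solveLoop_true]

-- ===== VERDICT (by name: the statement is the Claim_ definition above) =====
theorem solve_spec : Claim_equal_solve := by
  intro n _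
  unfold Spec_solve solve solve_alt
  simp only [solveLoop_false]
  cases firstNon3 (PySem.Int.toStr n).toList <;> simp
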